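-- pv_equiv track=rewrite | github.com/rrossinni-exelixis/openstudybuilder-solution | clinical-mdr-api/common/utils.py | insert_space_after_commas
-- ===== SOURCE A (Python) =====
-- def insert_space_after_commas(text: str, n: int, space=" ") -> str:
--     """Inserts a whitespace after the next comma after every n characters, not counting commas.
--
--     The purpose is to make long comma-separated strings line-breakable by injecting spaces after about every N chars,
--     (not counting commas).
--     """
--
--     parts = text.split(",")
--     result = [parts[0]]
--     parts_len = len(parts[0])
--
--     for part in parts[1:]:
--         result.append(",")
--
--         if parts_len >= n:
--             result.append(space)
--             parts_len = len(part)
--         else: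
--             parts_len += len(part)
--
--         result.append(part)
--
--     return "".join(result)
-- ===== SOURCE B (Python) =====
-- def insert_space_after_commas(text: str, n: int, space=" ") -> str:
--     """Single character-by-character scan: count non-comma characters since the
--     last inserted space; at each comma, insert `space` if the count reached n."""
--     out = []
--     count = 0
--     for ch in text:
--         out.append(ch)
--         if ch == ",":
--             if count >= n:
--                 out.append(space)
--                 count = 0
--         else:
--             count += 1
--     return "".join(out)
-- ===== Notes on version B (the rewrite author's own statement) =====
-- stated objective: simpler
-- what changed: Replaced the split-on-comma pass over a list of parts (with a running sum of part lengths) by a single character-by-character scan that counts non-comma characters since the last inserted space.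
import Mathlib
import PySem

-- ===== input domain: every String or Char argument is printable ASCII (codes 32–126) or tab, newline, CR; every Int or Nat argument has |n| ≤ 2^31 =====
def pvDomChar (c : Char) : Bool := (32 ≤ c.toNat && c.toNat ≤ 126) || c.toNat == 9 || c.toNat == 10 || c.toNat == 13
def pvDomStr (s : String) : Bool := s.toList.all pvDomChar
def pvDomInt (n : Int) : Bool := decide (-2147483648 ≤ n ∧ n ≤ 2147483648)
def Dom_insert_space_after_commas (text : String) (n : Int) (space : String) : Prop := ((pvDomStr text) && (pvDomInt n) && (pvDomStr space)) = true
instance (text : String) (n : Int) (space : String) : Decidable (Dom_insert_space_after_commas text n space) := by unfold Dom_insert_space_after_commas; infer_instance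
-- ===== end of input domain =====

-- B replaces A's split-on-comma pass over a list of parts by a single character scan
-- counting non-comma characters since the last inserted space (same decisions, plainer loop).

-- ===== PORT A =====
-- parts = text.split(","); result = [parts[0]]; fold over parts[1:] carrying (result, parts_len); "".join(result)
def insert_space_after_commas (text : String) (n : Int) (space : String) : String :=
  let parts : List (List Char) := PySem.Chars.splitOn text.toList [',']
  let p0 : List Char := parts.headD []      -- parts[0]; split always yields a nonempty list
  let st := (parts.drop 1).foldl
    (fun (st : List (List Char) × Int) part =>
      if st.2 ≥ n then (st.1 ++ [[','], space.toList, part], (part.length : Int))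
      else (st.1 ++ [[','], part], st.2 + (part.length : Int)))
    ([p0], (p0.length : Int))
  String.ofList (PySem.Chars.join [] st.1)

-- ===== PORT B =====
-- one scan over the characters: state = (output chars, non-comma chars since last reset)
def insert_space_after_commas_alt (text : String) (n : Int) (space : String) : String :=
  let st := text.toList.foldl
    (fun (st : List Char × Int) ch =>
      if ch = ',' then
        if st.2 ≥ n then (st.1 ++ [','] ++ space.toList, 0)
        else (st.1 ++ [','], st.2)
      else (st.1 ++ [ch], st.2 + 1))
    ([], 0)
  String.ofList st.1

-- ===== PRECONDITION & SPEC =====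
def Spec_insert_space_after_commas (text : String) (n : Int) (space : String) (out : String) : Prop := out = insert_space_after_commas_alt text n space
instance (text : String) (n : Int) (space : String) (out : String) : Decidable (Spec_insert_space_after_commas text n space out) := by unfold Spec_insert_space_after_commas; infer_instance

-- ===== CLAIM (what is proved, stated in full; the proofs are below) =====
def Claim_equal_insert_space_after_commas : Prop := ∀ (text : String) (n : Int) (space : String), Dom_insert_space_after_commas text n space → Spec_insert_space_after_commas text n space (insert_space_after_commas text n space)

-- ===== LEMMAS AND PROOFS =====

-- head and tail-parts of splitting a char list on ','
def pvSp : List Char → List Char × List (List Char)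
  | [] => ([], [])
  | c :: rest =>
    let pr := pvSp rest
    if c = ',' then ([], pr.1 :: pr.2) else (c :: pr.1, pr.2)

-- the common specification: emit chars, count non-commas, insert `sp` after a comma when cnt ≥ n
def pvSpec (n : Int) (sp : List Char) : List Char → Int → List Char
  | [], _ => []
  | c :: rest, cnt =>
    if c = ',' then
      if cnt ≥ n then ',' :: (sp ++ pvSpec n sp rest 0)
      else ',' :: pvSpec n sp rest cnt
    else c :: pvSpec n sp rest (cnt + 1)

theorem pvSp_go (cs : List Char) : ∀ (fuel : Nat) (cur : List Char) (acc : List (List Char)),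
    cs.length < fuel →
    PySem.Chars.splitOn.go [','] fuel cs cur acc
      = acc.reverse ++ (cur.reverse ++ (pvSp cs).1) :: (pvSp cs).2 := by
  induction cs with
  | nil =>
    intro fuel cur acc h
    match fuel, h with
    | fuel+1, _ => simp [PySem.Chars.splitOn.go, pvSp]
  | cons c rest ih =>
    intro fuel cur acc h
    match fuel, h with
    | fuel+1, h =>
      by_cases hc : c = ','
      · subst hc
        rw [show PySem.Chars.splitOn.go [','] (fuel+1) (',' :: rest) cur acc
              = PySem.Chars.splitOn.go [','] fuel rest [] (cur.reverse :: acc) by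
            simp [PySem.Chars.splitOn.go]]
        rw [ih fuel [] (cur.reverse :: acc) (by simpa using h)]
        simp [pvSp]
      · rw [show PySem.Chars.splitOn.go [','] (fuel+1) (c :: rest) cur acc
              = PySem.Chars.splitOn.go [','] fuel rest (c :: cur) acc by
            simp [PySem.Chars.splitOn.go, List.isPrefixOf]
            intro he; exact absurd he.symm hc]
        rw [ih fuel (c :: cur) acc (by simpa using h)]
        simp [pvSp, hc]

theorem pvSplitOn_eq (cs : List Char) :
    PySem.Chars.splitOn cs [','] = (pvSp cs).1 :: (pvSp cs).2 := by
  show PySem.Chars.splitOn.go [','] (cs.length + 1) cs [] [] = _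
  rw [pvSp_go cs (cs.length + 1) [] [] (by omega)]
  simp

theorem pvSp_comma_free (cs : List Char) :
    ',' ∉ (pvSp cs).1 ∧ ∀ p ∈ (pvSp cs).2, ',' ∉ p := by
  induction cs with
  | nil => simp [pvSp]
  | cons c rest ih =>
    by_cases hc : c = ','
    · subst hc; simpa [pvSp] using ⟨ih.1, ih.2⟩
    · simp only [pvSp, if_neg hc]
      refine ⟨?_, ih.2⟩
      simp only [List.mem_cons, not_or]
      exact ⟨fun he => hc he.symm, ih.1⟩

theorem pvSp_recon (cs : List Char) :
    cs = (pvSp cs).1 ++ (pvSp cs).2.flatMap (',' :: ·) := by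
  induction cs with
  | nil => simp [pvSp]
  | cons c rest ih =>
    by_cases hc : c = ','
    · subst hc; simp only [pvSp]
      simpa using ih
    · simp only [pvSp, if_neg hc]
      simpa using ih

theorem pvSpec_append (n : Int) (sp : List Char) (seg : List Char) (h : ',' ∉ seg) :
    ∀ (cs : List Char) (cnt : Int),
    pvSpec n sp (seg ++ cs) cnt = seg ++ pvSpec n sp cs (cnt + (seg.length : Int)) := by
  induction seg with
  | nil => intro cs cnt; simp
  | cons c rest ih =>
    intro cs cnt
    have hc : c ≠ ',' := fun he => h (he ▸ List.mem_cons_self)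
    have hr : ',' ∉ rest := fun hm => h (List.mem_cons_of_mem _ hm)
    simp only [List.cons_append, pvSpec, if_neg hc]
    rw [ih hr cs (cnt + 1)]
    have h2 : cnt + 1 + (rest.length : Int) = cnt + ((rest.length : Int) + 1) := by ring
    simp only [List.length_cons, Nat.cast_add, Nat.cast_one, h2]

theorem pvFoldB (n : Int) (sp : List Char) :
    ∀ (cs : List Char) (acc : List Char) (cnt : Int),
    (cs.foldl
      (fun (st : List Char × Int) ch =>
        if ch = ',' then
          if st.2 ≥ n then (st.1 ++ [','] ++ sp, 0)
          else (st.1 ++ [','], st.2)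
        else (st.1 ++ [ch], st.2 + 1)) (acc, cnt)).1
      = acc ++ pvSpec n sp cs cnt := by
  intro cs
  induction cs with
  | nil => intro acc cnt; simp [pvSpec]
  | cons c rest ih =>
    intro acc cnt
    by_cases hc : c = ','
    · subst hc
      by_cases hn : cnt ≥ n
      · simp only [List.foldl_cons, if_pos hn, ih, pvSpec]
        simp
      · simp only [List.foldl_cons, if_neg hn, ih, pvSpec]
        simp
    · simp only [List.foldl_cons, if_neg hc]
      rw [ih]
      simp [pvSpec, hc]

theorem pvJoinNil (l : List (List Char)) : PySem.Chars.join [] l = l.flatten := by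
  induction l with
  | nil => rfl
  | cons x xs ih =>
    cases xs with
    | nil => simp [PySem.Chars.join, List.intercalate]
    | cons y ys =>
      simp only [PySem.Chars.join, List.intercalate] at ih ⊢
      simp_all

theorem pvFoldA (n : Int) (sp : List Char) :
    ∀ (parts : List (List Char)) (acc : List (List Char)) (cnt : Int),
    (∀ p ∈ parts, ',' ∉ p) →
    ((parts.foldl
      (fun (st : List (List Char) × Int) part =>
        if st.2 ≥ n then (st.1 ++ [[','], sp, part], (part.length : Int))
        else (st.1 ++ [[','], part], st.2 + (part.length : Int))) (acc, cnt)).1).flatten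
      = acc.flatten ++ pvSpec n sp (parts.flatMap (',' :: ·)) cnt := by
  intro parts
  induction parts with
  | nil => intro acc cnt _; simp [pvSpec]
  | cons p ps ih =>
    intro acc cnt h
    have hp : ',' ∉ p := h p List.mem_cons_self
    have hps : ∀ q ∈ ps, ',' ∉ q := fun q hq => h q (List.mem_cons_of_mem _ hq)
    by_cases hn : cnt ≥ n
    · simp only [List.foldl_cons, List.flatMap_cons, List.cons_append, pvSpec, if_pos hn]
      rw [ih _ _ hps, pvSpec_append n sp p hp _ 0]
      simp
    · simp only [List.foldl_cons, List.flatMap_cons, List.cons_append, pvSpec, if_neg hn]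
      rw [ih _ _ hps, pvSpec_append n sp p hp _ cnt]
      simp

-- ===== VERDICT (by name: the statement is the Claim_ definition above) =====
theorem insert_space_after_commas_spec : Claim_equal_insert_space_after_commas := by
  intro text n space _
  show insert_space_after_commas text n space = insert_space_after_commas_alt text n space
  unfold insert_space_after_commas insert_space_after_commas_alt
  rw [pvSplitOn_eq]
  simp only [List.headD_cons, List.drop_succ_cons, List.drop_zero]
  rw [pvJoinNil, pvFoldA n space.toList _ _ _ (pvSp_comma_free text.toList).2,
      pvFoldB n space.toList]
  simp only [List.flatten_cons, List.flatten_nil, List.append_nil, List.nil_append]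
  congr 1
  conv_rhs => rw [pvSp_recon text.toList]
  rw [pvSpec_append n space.toList _ (pvSp_comma_free text.toList).1]
  simp
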